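-- pv_equiv track=rewrite | github.com/dabecow/python-labs | lab1/task2.py | list_to_tuple
-- ===== SOURCE A (Python) =====
-- def list_to_tuple(own_list):
--     list_copy = list(own_list).copy()
--
--     difference = 0
--
--     for i in range(0, len(list_copy) - 1):
--         if i % 2 != 0:
--             del (list_copy[i - difference])
--             difference += 1
--
--     return tuple(list_copy)
-- ===== SOURCE B (Python) =====
-- def list_to_tuple(own_list):
--     """Keep every second element; the final element is always retained."""
--     kept = [x for i, x in enumerate(own_list[:-1]) if i % 2 == 0]
--     kept.extend(own_list[-1:])
--     return tuple(kept)
-- ===== Notes on version B (the rewrite author's own statement) =====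
-- stated objective: faster
-- what changed: Replaces the loop that repeatedly deletes from a mutable copy (each del shifting the tail) with a single filtering pass: keep the elements at even positions among all but the last, then the last element (which the original's range(0, n-1) loop never touches).
import Mathlib
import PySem

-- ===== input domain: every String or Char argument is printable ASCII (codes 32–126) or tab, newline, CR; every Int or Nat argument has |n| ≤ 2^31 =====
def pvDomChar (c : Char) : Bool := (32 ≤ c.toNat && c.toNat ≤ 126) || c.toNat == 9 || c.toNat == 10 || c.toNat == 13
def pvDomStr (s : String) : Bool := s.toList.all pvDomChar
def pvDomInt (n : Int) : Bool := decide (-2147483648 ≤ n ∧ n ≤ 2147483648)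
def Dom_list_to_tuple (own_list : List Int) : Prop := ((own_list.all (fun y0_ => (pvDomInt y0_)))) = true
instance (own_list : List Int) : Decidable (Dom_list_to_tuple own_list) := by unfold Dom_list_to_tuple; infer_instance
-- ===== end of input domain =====

-- B replaces A's repeated in-place deletions (quadratic) with one filtering pass over
-- own_list[:-1] keeping even positions, followed by the last element; return value only
-- (A mutates only its private copy).

-- ===== PORT A =====
-- the loop body: on odd i, 'del list_copy[i - difference]; difference += 1'
-- (the del index is always in range here, so pop? always returns some; the none branch is unreachable)
def pvStepA (st : List Int × Int) (i : Int) : List Int × Int :=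
  if PySem.Int.mod i 2 ≠ 0 then
    match PySem.List.pop? st.1 (i - st.2) with
    | some pr => (pr.2, st.2 + 1)
    | none => (st.1, st.2 + 1)
  else st

def list_to_tuple (own_list : List Int) : List Int :=
  let list_copy := own_list
  let r := (PySem.List.pyRange 0 ((list_copy.length : Int) - 1) 1).foldl pvStepA (list_copy, 0)
  r.1

-- ===== PORT B =====
def list_to_tuple_alt (own_list : List Int) : List Int :=
  let kept := ((PySem.List.enumerate (PySem.List.slice own_list none (some (-1))) 0).filter
      (fun p => PySem.Int.mod p.1 2 == 0)).map (·.2)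
  kept ++ PySem.List.slice own_list (some (-1)) none

-- ===== PRECONDITION & SPEC =====
def Spec_list_to_tuple (own_list : List Int) (out : List Int) : Prop := out = list_to_tuple_alt own_list
instance (own_list : List Int) (out : List Int) : Decidable (Spec_list_to_tuple own_list out) := by unfold Spec_list_to_tuple; infer_instance

-- ===== CLAIM (what is proved, stated in full; the proofs are below) =====
def Claim_equal_list_to_tuple : Prop := ∀ (own_list : List Int), Dom_list_to_tuple own_list → Spec_list_to_tuple own_list (list_to_tuple own_list)

-- ===== LEMMAS AND PROOFS =====

-- common characterisation of both results: keep the first of each pair, except that the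
-- final one or two elements are always kept
def pvFinish : List Int → List Int
  | [] => []
  | [a] => [a]
  | [a, b] => [a, b]
  | a :: _ :: c :: t => a :: pvFinish (c :: t)

-- elements at even positions
def pvEvens : List Int → List Int
  | [] => []
  | [a] => [a]
  | a :: _ :: t => a :: pvEvens t

theorem pvStepA_even (st : List Int × Int) (j : Int) :
    pvStepA st (2 * j) = st := by
  simp [pvStepA]

theorem pvLoopA : ∀ (ys P : List Int) (j : ℕ), P.length = j →
    ((List.range' (2 * j) (ys.length - 1)).map Int.ofNat).foldl pvStepA (P ++ ys, (j : Int))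
      = (P ++ pvFinish ys, (j : Int) + (((ys.length - 1) / 2 : ℕ) : Int))
  | [], P, j, hP => by simp [pvFinish]
  | [a], P, j, hP => by simp [pvFinish]
  | [a, b], P, j, hP => by
    simp [pvFinish, pvStepA_even]
  | a :: b :: c :: t, P, j, hP => by
    have hlen : (a :: b :: c :: t).length - 1 = ((c :: t).length - 1) + 2 := by
      simp
    rw [hlen]
    have hr : List.range' (2 * j) (((c :: t).length - 1) + 2)
        = (2 * j) :: (2 * j + 1) :: List.range' (2 * (j + 1)) ((c :: t).length - 1) := by
      rw [show ((c :: t).length - 1) + 2 = (((c :: t).length - 1) + 1) + 1 by omega]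
      rw [List.range'_succ, List.range'_succ]
      congr 2
    rw [hr]
    simp only [List.map_cons, List.foldl_cons, Int.ofNat_eq_natCast]
    -- step i = 2j : even, no-op
    have e1 : pvStepA (P ++ a :: b :: c :: t, (j : Int)) ((2 * j : ℕ) : Int) = (P ++ a :: b :: c :: t, (j : Int)) := by
      have : ((2 * j : ℕ) : Int) = 2 * (j : Int) := by push_cast; ring
      rw [this, pvStepA_even]
    rw [e1]
    -- step i = 2j+1 : odd, delete index (2j+1) - j = j+1, i.e. b
    have e2 : pvStepA (P ++ a :: b :: c :: t, (j : Int)) ((2 * j + 1 : ℕ) : Int)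
        = ((P ++ [a]) ++ c :: t, ((j + 1 : ℕ) : Int)) := by
      have hm : PySem.Int.mod ((2 * j + 1 : ℕ) : Int) 2 = 1 := by
        rw [PySem.Int.mod_eq_emod_of_pos (by norm_num)]
        omega
      have hidx : ((2 * j + 1 : ℕ) : Int) - (j : Int) = ((j + 1 : ℕ) : Int) := by push_cast; ring
      have hlt : j + 1 < (P ++ a :: b :: c :: t).length := by simp [hP]
      have hpop := PySem.List.pop?_natCast (xs := P ++ a :: b :: c :: t) (n := j + 1) hlt
      have herase : (P ++ a :: b :: c :: t).eraseIdx (j + 1) = (P ++ [a]) ++ c :: t := by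
        rw [List.eraseIdx_append_of_length_le (by omega)]
        rw [show j + 1 - P.length = 1 by omega]
        simp
      simp only [pvStepA, hm, hidx]
      rw [hpop, herase]
      simp
    rw [e2]
    rw [pvLoopA (c :: t) (P ++ [a]) (j + 1) (by simp [hP])]
    simp [pvFinish]
    omega

theorem pvAchar (xs : List Int) : list_to_tuple xs = pvFinish xs := by
  have hpy : PySem.List.pyRange 0 ((xs.length : Int) - 1) 1
      = (List.range' (2 * 0) (xs.length - 1)).map Int.ofNat := by
    rw [PySem.List.pyRange_one]
    have h1 : ((xs.length : Int) - 1 - 0).toNat = xs.length - 1 := by omega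
    rw [h1, List.range_eq_range']
    apply List.map_congr_left
    intro m _
    simp
  have h2 := pvLoopA xs [] 0 rfl
  simp only [Nat.cast_zero, List.nil_append] at h2
  simp only [list_to_tuple]
  rw [hpy, h2]

-- the enumerate-and-filter pass computes pvEvens, two positions at a time
theorem pvLoopB : ∀ (ys : List Int) (j : Int),
    ((PySem.List.enumerate ys (2 * j)).filter
        (fun p => PySem.Int.mod p.1 2 == 0)).map (·.2) = pvEvens ys
  | [], j => by simp [pvEvens]
  | [a], j => by
    have hma : PySem.Int.mod (2 * j) 2 = 0 := by
      rw [PySem.Int.mod_eq_emod_of_pos (by norm_num)]; omega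
    simp [pvEvens, PySem.List.enumerate_cons]
  | a :: b :: t, j => by
    have hma : PySem.Int.mod (2 * j) 2 = 0 := by
      rw [PySem.Int.mod_eq_emod_of_pos (by norm_num)]; omega
    have hm : PySem.Int.mod (2 * j + 1) 2 = 1 := by
      rw [PySem.Int.mod_eq_emod_of_pos (by norm_num)]; omega
    have hs : (2 : Int) * j + 1 + 1 = 2 * (j + 1) := by ring
    have hrec := pvLoopB t (j + 1)
    simp only [PySem.List.enumerate_cons, List.filter_cons, hs] at hrec ⊢
    simp [pvEvens]
    simpa using hrec

-- even positions of xs.dropLast, then the final element, is exactly pvFinish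
theorem pvSplit : ∀ (xs : List Int),
    pvEvens xs.dropLast ++ xs.drop (xs.length - 1) = pvFinish xs
  | [] => by simp [pvEvens, pvFinish]
  | [a] => by simp [pvEvens, pvFinish]
  | [a, b] => by simp [pvEvens, pvFinish]
  | a :: b :: c :: t => by
    have hd : (a :: b :: c :: t).dropLast = a :: b :: (c :: t).dropLast := by simp
    have hdr : (a :: b :: c :: t).drop ((a :: b :: c :: t).length - 1)
        = (c :: t).drop ((c :: t).length - 1) := by
      simp [List.drop]
    rw [hd, hdr, show pvEvens (a :: b :: (c :: t).dropLast) = a :: pvEvens (c :: t).dropLast from rfl]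
    rw [show pvFinish (a :: b :: c :: t) = a :: pvFinish (c :: t) from rfl]
    simpa using pvSplit (c :: t)

theorem pvBchar (xs : List Int) : list_to_tuple_alt xs = pvFinish xs := by
  simp only [list_to_tuple_alt]
  rw [PySem.List.slice_to_neg_one, PySem.List.slice_from_neg_one]
  have := pvLoopB xs.dropLast 0
  rw [show (2 : Int) * 0 = 0 by ring] at this
  rw [this, pvSplit]

-- ===== VERDICT (by name: the statement is the Claim_ definition above) =====
theorem list_to_tuple_spec : Claim_equal_list_to_tuple := by
  intro xs _
  show list_to_tuple xs = list_to_tuple_alt xs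
  rw [pvAchar, pvBchar]
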